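-- pv_equiv track=rewrite | github.com/ictxiangxin/paradox | paradox/operator.py | transpose_shape
-- ===== SOURCE A (Python) =====
-- def transpose_shape(shape_a, axes):
--     if axes is None:
--         return tuple(reversed(shape_a)), (), ()
--     else:
--         if len(set(axes)) == len(axes):
--             if set(axes) == set(range(len(axes))) and len(axes) == len(shape_a):
--                 new_shape = [0] * len(shape_a)
--                 for i, d in zip(axes, shape_a):
--                     new_shape[i] = d
--                 return tuple(new_shape), (), ()
--             else:
--                 ValueError('Invalid axes for this Shape: shape={}, axes={}'.format(shape_a, axes))
--         else:
--             ValueError('Repeated axis in axes: {}'.format(axes))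
-- ===== SOURCE B (Python) =====
-- def transpose_shape(shape_a, axes):
--     if axes is None:
--         return tuple(reversed(shape_a)), (), ()
--     if sorted(axes) == list(range(len(axes))) and len(axes) == len(shape_a):
--         return tuple(d for _, d in sorted(zip(axes, shape_a), key=lambda p: p[0])), (), ()
-- ===== Notes on version B (the rewrite author's own statement) =====
-- stated objective: simpler
-- what changed: Replaces A's three nested set/len guards and the preallocate-and-scatter loop (new_shape[axes[k]]=shape_a[k]) by a single guard sorted(axes)==range(len(axes)) and a sort-and-extract pass over the (axis,dim) pairs.
-- outside the precondition, e.g. on transpose_shape((2, 3), [0, 0]): A returns None, B returns None; on transpose_shape((2, 3), [1, 2]): A returns None, B returns None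
import Mathlib
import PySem

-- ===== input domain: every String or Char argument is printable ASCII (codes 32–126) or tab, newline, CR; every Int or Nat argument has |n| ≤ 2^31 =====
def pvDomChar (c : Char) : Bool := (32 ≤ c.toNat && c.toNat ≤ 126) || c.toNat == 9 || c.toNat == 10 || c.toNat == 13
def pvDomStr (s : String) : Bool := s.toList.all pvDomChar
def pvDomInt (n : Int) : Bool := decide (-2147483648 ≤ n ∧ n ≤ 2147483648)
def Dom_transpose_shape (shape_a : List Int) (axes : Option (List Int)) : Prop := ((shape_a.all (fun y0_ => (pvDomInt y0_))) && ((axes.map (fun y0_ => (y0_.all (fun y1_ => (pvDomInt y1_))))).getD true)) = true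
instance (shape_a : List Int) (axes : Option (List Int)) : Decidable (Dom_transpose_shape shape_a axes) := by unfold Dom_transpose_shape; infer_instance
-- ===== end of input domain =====

-- B replaces A's set/len guards and index-scatter loop by one sorted(axes)==range guard and a
-- sort-and-extract over the (axis,dim) pairs (objective: simpler). Pre_ excludes inputs on which
-- the Python A falls through its un-raised ValueError branches and returns None (no tuple value).

-- ===== PORT A =====
-- Python 'new_shape[i] = d'; exact for 0 ≤ i < len(new_shape), the only case the guarded loop reaches
def pySetItem (xs : List Int) (i : Int) (d : Int) : List Int := xs.set i.toNat d

def transpose_shape (shape_a : List Int) (axes : Option (List Int)) : List (List Int) :=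
  match axes with
  | none => [shape_a.reverse, [], []]
  | some ax =>
    if PySem.Set.len (PySem.Set.ofList ax) = (ax.length : Int) then
      if PySem.Set.equal (PySem.Set.ofList ax) (PySem.Set.ofList (PySem.List.pyRange 0 (ax.length : Int) 1))
          && ax.length == shape_a.length then
        let new_shape := (ax.zip shape_a).foldl (fun ns p => pySetItem ns p.1 p.2)
          (List.replicate shape_a.length 0)
        [new_shape, [], []]
      else []  -- Python: un-raised ValueError, falls through returning None (outside Pre_)
    else []    -- Python: un-raised ValueError, falls through returning None (outside Pre_)

-- ===== PORT B =====
def transpose_shape_alt (shape_a : List Int) (axes : Option (List Int)) : List (List Int) :=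
  match axes with
  | none => [shape_a.reverse, [], []]
  | some ax =>
    if PySem.List.sorted ax (fun x => x) false = PySem.List.pyRange 0 (ax.length : Int) 1
        ∧ ax.length = shape_a.length then
      [(PySem.List.sorted (ax.zip shape_a) (fun p => p.1) false).map (fun p => p.2), [], []]
    else []    -- Python: implicitly returns None (outside Pre_)

-- ===== PRECONDITION & SPEC =====
-- Pre_ excludes exactly the inputs on which Python A returns None (not a tuple value): an axes list
-- that is not a permutation of range(len(shape_a)).
def Pre_transpose_shape (shape_a : List Int) (axes : Option (List Int)) : Prop :=
  (match axes with
  | none => true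
  | some ax => decide (ax.Nodup ∧ ax.length = shape_a.length ∧
      ∀ j ∈ List.range ax.length, ((j : Int) ∈ ax))) = true
instance (shape_a : List Int) (axes : Option (List Int)) : Decidable (Pre_transpose_shape shape_a axes) := by
  unfold Pre_transpose_shape; infer_instance

def pvWitness_transpose_shape : List Int × Option (List Int) := ([4, 5, 6], some [1, 2, 0])

def Spec_transpose_shape (shape_a : List Int) (axes : Option (List Int)) (out : List (List Int)) : Prop := out = transpose_shape_alt shape_a axes
instance (shape_a : List Int) (axes : Option (List Int)) (out : List (List Int)) : Decidable (Spec_transpose_shape shape_a axes out) := by unfold Spec_transpose_shape; infer_instance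

-- ===== CLAIM (what is proved, stated in full; the proofs are below) =====
def Claim_equal_transpose_shape : Prop := ∀ (shape_a : List Int) (axes : Option (List Int)), Dom_transpose_shape shape_a axes → Pre_transpose_shape shape_a axes → Spec_transpose_shape shape_a axes (transpose_shape shape_a axes)

-- ===== LEMMAS AND PROOFS =====

-- Under Pre_, axes is a permutation of pyRange 0 n 1.
lemma perm_pyRange_of_pre (ax : List Int) (hnd : ax.Nodup)
    (hmem : ∀ j ∈ List.range ax.length, ((j : Int) ∈ ax)) :
    ax.Perm (PySem.List.pyRange 0 (ax.length : Int) 1) := by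
  have hr : PySem.List.pyRange 0 (ax.length : Int) 1
      = (List.range ax.length).map (fun k : Nat => (k : Int)) := by
    rw [PySem.List.pyRange_one]; simp
  rw [hr]
  have hnd2 : ((List.range ax.length).map (fun k : Nat => (k : Int))).Nodup :=
    List.nodup_range.map (fun a b h => by exact_mod_cast h)
  have hsub : ((List.range ax.length).map (fun k : Nat => (k : Int))) ⊆ ax := by
    intro x hx
    obtain ⟨j, hj, rfl⟩ := List.mem_map.mp hx
    exact hmem j hj
  have hsp : ((List.range ax.length).map (fun k : Nat => (k : Int))).Subperm ax :=
    hnd2.subperm hsub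
  have hlen : ax.length ≤ ((List.range ax.length).map (fun k : Nat => (k : Int))).length := by simp
  exact (hsp.perm_of_length_le hlen).symm

-- the scatter loop preserves length
lemma scatter_length (l : List (Int × Int)) (ns : List Int) :
    (l.foldl (fun ns p => pySetItem ns p.1 p.2) ns).length = ns.length := by
  induction l generalizing ns with
  | nil => rfl
  | cons p t ih => rw [List.foldl_cons, ih]; simp [pySetItem]

-- value of the scatter loop at index j
lemma scatter_get (ax : List Int) (s ns : List Int)
    (hnd : ax.Nodup) (hlen : ax.length = s.length)
    (hbound : ∀ a ∈ ax, 0 ≤ a ∧ a.toNat < ns.length)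
    (j : Nat) (hj : j < ns.length) :
    ((ax.zip s).foldl (fun ns p => pySetItem ns p.1 p.2) ns)[j]? =
      some (if (j : Int) ∈ ax then s.getD (ax.idxOf (j : Int)) 0 else ns.getD j 0) := by
  induction ax generalizing s ns with
  | nil => simp [List.getElem?_eq_getElem hj, List.getD_eq_getElem ns 0 hj]
  | cons a t ih =>
    cases s with
    | nil => simp at hlen
    | cons d s' =>
      have hanot : a ∉ t := (List.nodup_cons.mp hnd).1
      have hnd' : t.Nodup := (List.nodup_cons.mp hnd).2
      have hlen' : t.length = s'.length := by simpa using hlen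
      have ha := hbound a List.mem_cons_self
      have hbound' : ∀ b ∈ t, 0 ≤ b ∧ b.toNat < (pySetItem ns a d).length := by
        intro b hb
        have := hbound b (List.mem_cons_of_mem _ hb)
        simpa [pySetItem] using this
      have hj' : j < (pySetItem ns a d).length := by simpa [pySetItem] using hj
      have key := ih s' (pySetItem ns a d) hnd' hlen' hbound' hj'
      rw [List.zip_cons_cons, List.foldl_cons, key]
      by_cases h1 : (j : Int) ∈ t
      · have haj : a ≠ (j : Int) := by rintro rfl; exact hanot h1
        simp [h1, List.idxOf_cons_ne _ haj]
      · by_cases h2 : a = (j : Int)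
        · subst h2
          have hsome : (pySetItem ns ((j : Nat) : Int) d)[j]? = some d := by
            rw [List.getElem?_eq_getElem hj']
            simp [pySetItem]
          simp [h1, List.idxOf_cons_eq _ rfl, hsome]
        · have hne : a.toNat ≠ j := by
            intro hc
            exact h2 (by omega)
          have hmm : ¬ ((j : Int) ∈ a :: t) := by
            rw [List.mem_cons]
            push_neg
            exact ⟨fun hc => h2 hc.symm, h1⟩
          have hsome : (pySetItem ns a d)[j]? = ns[j]? := by
            rw [List.getElem?_eq_getElem hj', List.getElem?_eq_getElem hj]
            simp [pySetItem, List.getElem_set_ne hne]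
          simp [h1, hmm, hsome]

-- B's sorted zip, written out: pair j with the dimension sitting at axes.idxOf j
lemma sorted_zip_eq (ax s : List Int) (hnd : ax.Nodup) (hlen : ax.length = s.length)
    (hperm : ax.Perm (PySem.List.pyRange 0 (ax.length : Int) 1)) :
    PySem.List.sorted (ax.zip s) (fun p => p.1) false
      = (List.range ax.length).map (fun j : Nat => ((j : Int), s.getD (ax.idxOf (j : Int)) 0)) := by
  have hmemax : ∀ x : Int, x ∈ ax ↔ (0 ≤ x ∧ x < (ax.length : Int)) := by
    intro x
    rw [hperm.mem_iff, PySem.List.mem_pyRange_one]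
  apply PySem.List.sorted_eq_of_perm_of_pairwise_lt
  · -- the named list is a permutation of ax.zip s
    have hndC : ((List.range ax.length).map
        (fun j : Nat => ((j : Int), s.getD (ax.idxOf (j : Int)) 0))).Nodup := by
      refine List.nodup_range.map ?_
      intro a b h
      have := congrArg Prod.fst h
      simpa using this
    have hndZ : (ax.zip s).Nodup := by
      have hmn : ((ax.zip s).map Prod.fst).Nodup := by
        rw [List.map_fst_zip (l₁ := ax) (l₂ := s) (by omega)]
        exact hnd
      exact List.Nodup.of_map Prod.fst hmn
    refine (List.perm_ext_iff_of_nodup hndC hndZ).mpr ?_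
    intro p
    constructor
    · intro hp
      obtain ⟨j, hj, rfl⟩ := List.mem_map.mp hp
      rw [List.mem_range] at hj
      have hjm : (j : Int) ∈ ax := (hmemax _).mpr (by constructor <;> omega)
      have hkl : ax.idxOf ((j : Int)) < ax.length := List.idxOf_lt_length_of_mem hjm
      have hks : ax.idxOf ((j : Int)) < s.length := by omega
      have hkz : ax.idxOf ((j : Int)) < (ax.zip s).length := by
        rw [List.length_zip]; omega
      refine List.mem_iff_getElem.mpr ⟨ax.idxOf ((j : Int)), hkz, ?_⟩
      rw [List.getElem_zip]
      rw [List.getElem_idxOf hkl, List.getD_eq_getElem s 0 hks]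
    · intro hp
      obtain ⟨i, hi, hpe⟩ := List.mem_iff_getElem.mp hp
      have hiz : i < ax.length := by rw [List.length_zip] at hi; omega
      have his : i < s.length := by omega
      rw [List.getElem_zip] at hpe
      have haxm : ax[i] ∈ ax := List.getElem_mem hiz
      have hb := (hmemax _).mp haxm
      refine List.mem_map.mpr ⟨(ax[i]).toNat, ?_, ?_⟩
      · rw [List.mem_range]; omega
      · have hcast : (((ax[i]).toNat : Int)) = ax[i] := Int.toNat_of_nonneg hb.1
        have hkk : ax.idxOf ((((ax[i]).toNat : Nat) : Int)) = i := by
          rw [hcast]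
          exact hnd.idxOf_getElem i hiz
        rw [hkk, hcast, List.getD_eq_getElem s 0 his, hpe]
  · -- strictly increasing first components
    rw [List.pairwise_map]
    exact List.pairwise_lt_range.imp (by intro a b h; simpa using h)

-- ===== VERDICT (by name: the statement is the Claim_ definition above) =====
theorem transpose_shape_spec : Claim_equal_transpose_shape := by
  unfold Claim_equal_transpose_shape
  intro shape_a axes _hdom hpre
  unfold Spec_transpose_shape
  cases axes with
  | none => rfl
  | some ax =>
    have hp : ax.Nodup ∧ ax.length = shape_a.length ∧
        ∀ j ∈ List.range ax.length, ((j : Int) ∈ ax) := by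
      unfold Pre_transpose_shape at hpre
      exact of_decide_eq_true hpre
    obtain ⟨hnd, hlen, hmem⟩ := hp
    have hperm := perm_pyRange_of_pre ax hnd hmem
    have hmemax : ∀ x : Int, x ∈ ax ↔ (0 ≤ x ∧ x < (ax.length : Int)) := by
      intro x; rw [hperm.mem_iff, PySem.List.mem_pyRange_one]
    have hofl : PySem.Set.ofList ax = ax := PySem.Set.ofList_eq_self_of_nodup ax hnd
    have g1 : PySem.Set.len (PySem.Set.ofList ax) = (ax.length : Int) := by
      rw [hofl]
      simp [PySem.Set.len]
    have g2 : PySem.Set.equal (PySem.Set.ofList ax)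
        (PySem.Set.ofList (PySem.List.pyRange 0 (ax.length : Int) 1)) = true := by
      rw [PySem.Set.equal_iff]
      intro x
      rw [PySem.Set.mem_ofList, PySem.Set.mem_ofList]
      exact hperm.mem_iff
    have g3 : (ax.length == shape_a.length) = true := by simpa using hlen
    have gB : PySem.List.sorted ax (fun x => x) false
        = PySem.List.pyRange 0 (ax.length : Int) 1 :=
      PySem.List.sorted_eq_of_perm_of_pairwise_lt _ _ _ hperm.symm (PySem.List.pairwise_lt_pyRange_one _ _)
    have hbound : ∀ a ∈ ax, 0 ≤ a ∧ a.toNat < (List.replicate shape_a.length (0 : Int)).length := by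
      intro a hA
      have := (hmemax a).mp hA
      rw [List.length_replicate]
      omega
    have hbody : (ax.zip shape_a).foldl (fun ns p => pySetItem ns p.1 p.2)
          (List.replicate shape_a.length 0)
        = (PySem.List.sorted (ax.zip shape_a) (fun p => p.1) false).map (fun p => p.2) := by
      rw [sorted_zip_eq ax shape_a hnd hlen hperm, List.map_map]
      apply List.ext_getElem?
      intro i
      by_cases hi : i < shape_a.length
      · have hlhs := scatter_get ax shape_a (List.replicate shape_a.length 0) hnd hlen hbound i
          (by rw [List.length_replicate]; exact hi)
        rw [hlhs]
        have himem : (i : Int) ∈ ax := (hmemax _).mpr (by constructor <;> omega)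
        rw [if_pos himem]
        have hrhs : ((List.range ax.length).map
            ((fun p : Int × Int => p.2) ∘ (fun j : Nat => ((j : Int), shape_a.getD (ax.idxOf (j : Int)) 0))))[i]?
            = some (shape_a.getD (ax.idxOf ((i : Nat) : Int)) 0) := by
          rw [List.getElem?_map, List.getElem?_range (by omega)]
          rfl
        rw [hrhs]
      · rw [List.getElem?_eq_none, List.getElem?_eq_none]
        · rw [List.length_map, List.length_range]; omega
        · rw [scatter_length, List.length_replicate]; omega
    simp only [transpose_shape, transpose_shape_alt]
    rw [if_pos g1, if_pos (by simp [g2, g3]), if_pos ⟨gB, hlen⟩, hbody]
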